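-- pv_equiv track=rewrite | github.com/azhengbot/Algorithm | UnionFindSet/src/main/python/solution6119.py | validSubarraySize
-- ===== SOURCE A (Python) =====
-- from typing import List
--
-- def validSubarraySize(nums: List[int], threshold: int) -> int:
--     n = len(nums)
--     fa = list(range(n + 1))
--
--     sz = [1] * (n + 1)
--
--     def find(x):
--         if fa[x] != x:
--             fa[x] = find(fa[x])
--
--         return fa[x]
--
--     q = sorted(zip(nums, range(n)), reverse=True)
--
--     for num, i in q:
--
--         f = find(i + 1)
--         fa[i] = f
--         sz[f] += sz[i]
--
--         size = sz[f] - 1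
--
--         if num > threshold // size:
--             return size
--
--     return -1
-- ===== SOURCE B (Python) =====
-- from typing import List
--
-- def validSubarraySize(nums: List[int], threshold: int) -> int:
--     n = len(nums)
--     for num, i in sorted(zip(nums, range(n)), reverse=True):
--         left = 0
--         while left < i and nums[i - 1 - left] > num:
--             left += 1
--         right = 0
--         while i + 1 + right < n and nums[i + 1 + right] >= num:
--             right += 1
--         size = left + 1 + right
--         if num > threshold // size:
--             return size
--     return -1
-- ===== Notes on version B (the rewrite author's own statement) =====
-- stated objective: alternative
-- what changed: Replaced the path-compressed union-find with fa/sz arrays by direct per-element boundary scans: for each (num,i) in the same decreasing (num,index) order, B counts the contiguous run of strictly larger elements to the left and of >=-elements to the right, keeping the identical threshold//size check and -1 fallback.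
import Mathlib
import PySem

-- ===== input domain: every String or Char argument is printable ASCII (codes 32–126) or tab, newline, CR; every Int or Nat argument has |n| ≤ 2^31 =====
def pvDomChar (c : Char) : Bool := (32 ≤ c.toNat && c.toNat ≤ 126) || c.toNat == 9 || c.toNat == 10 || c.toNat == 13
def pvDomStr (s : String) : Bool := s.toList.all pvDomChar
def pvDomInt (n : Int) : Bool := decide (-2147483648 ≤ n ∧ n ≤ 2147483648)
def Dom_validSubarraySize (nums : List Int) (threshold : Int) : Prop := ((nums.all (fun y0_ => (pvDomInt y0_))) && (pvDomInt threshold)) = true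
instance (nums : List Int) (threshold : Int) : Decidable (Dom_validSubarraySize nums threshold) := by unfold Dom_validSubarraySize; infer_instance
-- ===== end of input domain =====

-- B replaces A's path-compressed union-find (fa/sz arrays) by direct left/right boundary
-- scans per element, keeping the identical decreasing (num, index) order and the
-- threshold // size check; objective: alternative (similar cost, no union-find state).

-- ===== PORT A =====
-- recursive `find` with path compression; the fuel argument (called with fa.length) is
-- only a totality guard: parent pointers strictly increase along a chain, so it never runs out.
def vssFind : Nat → List Nat → Nat → List Nat × Nat
  | 0, fa, x => (fa, x)
  | fuel+1, fa, x =>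
    let p := fa.getD x 0
    if p = x then (fa, x)
    else
      let r := vssFind fuel fa p
      (r.1.set x r.2, r.2)

-- the `for num, i in q:` loop of A, threading the fa and sz arrays
def vssLoopA (threshold : Int) : List Nat → List Nat → List (Int × Nat) → Int
  | _, _, [] => -1
  | fa, sz, (num, i) :: rest =>
    let fr := vssFind fa.length fa (i+1)
    let f := fr.2
    let fa2 := fr.1.set i f
    let sz2 := sz.set f (sz.getD f 0 + sz.getD i 0)
    let size := sz2.getD f 0 - 1
    if num > PySem.Int.floordiv threshold (size : Int) then (size : Int)
    else vssLoopA threshold fa2 sz2 rest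

def validSubarraySize (nums : List Int) (threshold : Int) : Int :=
  let n := nums.length
  let fa := List.range (n+1)
  let sz := List.replicate (n+1) 1
  let q := PySem.List.sorted (List.zip nums (List.range n)) (fun p => (toLex p : Lex (Int × Nat))) true
  vssLoopA threshold fa sz q

-- ===== PORT B =====
-- `while left < i and nums[i-1-left] > num: left += 1`, run over the reversed prefix
def vssRunL (num : Int) : List Int → Nat
  | [] => 0
  | v :: rest => if num < v then vssRunL num rest + 1 else 0

-- `while i+1+right < n and nums[i+1+right] >= num: right += 1`, run over the suffix
def vssRunR (num : Int) : List Int → Nat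
  | [] => 0
  | v :: rest => if num ≤ v then vssRunR num rest + 1 else 0

def vssLoopB (nums : List Int) (threshold : Int) : List (Int × Nat) → Int
  | [] => -1
  | (num, i) :: rest =>
    let left := vssRunL num ((nums.take i).reverse)
    let right := vssRunR num (nums.drop (i+1))
    let size := left + 1 + right
    if num > PySem.Int.floordiv threshold (size : Int) then (size : Int)
    else vssLoopB nums threshold rest

def validSubarraySize_alt (nums : List Int) (threshold : Int) : Int :=
  let n := nums.length
  vssLoopB nums threshold
    (PySem.List.sorted (List.zip nums (List.range n)) (fun p => (toLex p : Lex (Int × Nat))) true)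

-- ===== PRECONDITION & SPEC =====
def Spec_validSubarraySize (nums : List Int) (threshold : Int) (out : Int) : Prop := out = validSubarraySize_alt nums threshold
instance (nums : List Int) (threshold : Int) (out : Int) : Decidable (Spec_validSubarraySize nums threshold out) := by unfold Spec_validSubarraySize; infer_instance

-- ===== CLAIM (what is proved, stated in full; the proofs are below) =====
def Claim_equal_validSubarraySize : Prop := ∀ (nums : List Int) (threshold : Int), Dom_validSubarraySize nums threshold → Spec_validSubarraySize nums threshold (validSubarraySize nums threshold)

-- ===== LEMMAS AND PROOFS =====

-- D is the list of already-processed indices.  vssRoot D fuel x = least y ≥ x with y ∉ D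
-- (for sufficient fuel); vssLrun D r = length of the run of D-members directly below r.
def vssRoot (D : List Nat) : Nat → Nat → Nat
  | 0, x => x
  | fuel+1, x => if x ∈ D then vssRoot D fuel (x+1) else x

def vssLrun (D : List Nat) : Nat → Nat
  | 0 => 0
  | r+1 => if r ∈ D then vssLrun D r + 1 else 0

def vssFaInv (n : Nat) (D : List Nat) (fa : List Nat) : Prop :=
  fa.length = n+1 ∧
  (∀ x, x ≤ n → x ∉ D → fa.getD x 0 = x) ∧
  (∀ x, x ≤ n → x ∈ D → x < fa.getD x 0 ∧ fa.getD x 0 ≤ vssRoot D (n+1) x)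

def vssInv (n : Nat) (D : List Nat) (fa sz : List Nat) : Prop :=
  vssFaInv n D fa ∧ sz.length = n+1 ∧
  (∀ r, r ≤ n → r ∉ D → sz.getD r 0 = 1 + vssLrun D r)

lemma vssRoot_notMem (D : List Nat) (f x : Nat) (h : x ∉ D) : vssRoot D f x = x := by
  cases f <;> simp [vssRoot, h]

lemma vssRoot_spec (D : List Nat) (n : Nat) (hD : ∀ j ∈ D, j < n) :
    ∀ f x, n < x + f →
      x ≤ vssRoot D f x ∧ vssRoot D f x ∉ D ∧ ∀ y, x ≤ y → y < vssRoot D f x → y ∈ D := by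
  intro f
  induction f with
  | zero =>
    intro x hx
    have : x ∉ D := fun h => absurd (hD x h) (by omega)
    simp only [vssRoot]
    exact ⟨le_refl x, this, fun y h1 h2 => absurd h2 (by omega)⟩
  | succ f ih =>
    intro x hx
    by_cases hxD : x ∈ D
    · have h := ih (x+1) (by omega)
      refine ⟨?_, ?_, ?_⟩
      · simp only [vssRoot, if_pos hxD]; omega
      · simpa [vssRoot, hxD] using h.2.1
      · intro y hy1 hy2
        simp only [vssRoot, if_pos hxD] at hy2
        rcases Nat.eq_or_lt_of_le hy1 with rfl | hlt
        · exact hxD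
        · exact h.2.2 y (by omega) hy2
    · simp only [vssRoot, if_neg hxD]
      exact ⟨le_refl x, hxD, fun y h1 h2 => absurd h2 (by omega)⟩

lemma vssRoot_eq_of (D : List Nat) (n : Nat) (hD : ∀ j ∈ D, j < n) (f x r : Nat)
    (hf : n < x + f) (h1 : x ≤ r) (h2 : r ∉ D) (h3 : ∀ y, x ≤ y → y < r → y ∈ D) :
    vssRoot D f x = r := by
  obtain ⟨ha, hb, hc⟩ := vssRoot_spec D n hD f x hf
  rcases Nat.lt_trichotomy (vssRoot D f x) r with h | h | h
  · exact absurd (h3 _ ha h) hb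
  · exact h
  · exact absurd (hc r h1 h) h2

lemma vssRoot_le (D : List Nat) (n : Nat) (hD : ∀ j ∈ D, j < n) (f x : Nat)
    (hf : n < x + f) (hx : x ≤ n) : vssRoot D f x ≤ n := by
  obtain ⟨ha, hb, hc⟩ := vssRoot_spec D n hD f x hf
  by_contra h
  exact absurd (hD n (hc n hx (by omega))) (by omega)

lemma vssRoot_min (D : List Nat) (n : Nat) (hD : ∀ j ∈ D, j < n) (f x y : Nat)
    (hf : n < x + f) (hxy : x ≤ y) (hy : y ∉ D) : vssRoot D f x ≤ y := by
  obtain ⟨ha, hb, hc⟩ := vssRoot_spec D n hD f x hf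
  by_contra h
  exact absurd (hc y hxy (by omega)) hy

lemma vssRoot_segment (D : List Nat) (n : Nat) (hD : ∀ j ∈ D, j < n) (f x y : Nat)
    (hf : n < x + f) (hf' : n < y + f) (h1 : x ≤ y) (h2 : y ≤ vssRoot D f x) :
    vssRoot D f y = vssRoot D f x := by
  obtain ⟨ha, hb, hc⟩ := vssRoot_spec D n hD f x hf
  exact vssRoot_eq_of D n hD f y _ hf' h2 hb (fun z hz1 hz2 => hc z (by omega) hz2)

lemma vssLrun_congr (D D' : List Nat) : ∀ r, (∀ y, y < r → (y ∈ D ↔ y ∈ D')) →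
    vssLrun D r = vssLrun D' r := by
  intro r
  induction r with
  | zero => intro _; rfl
  | succ r ih =>
    intro h
    have hr := h r (by omega)
    by_cases hrD : r ∈ D
    · simp [vssLrun, hrD, hr.1 hrD, ih (fun y hy => h y (by omega))]
    · have : r ∉ D' := fun hx => hrD (hr.2 hx)
      simp [vssLrun, hrD, this]

lemma vssLrun_split (D : List Nat) : ∀ r i, i ≤ r → (∀ y, i ≤ y → y < r → y ∈ D) →
    vssLrun D r = (r - i) + vssLrun D i := by
  intro r
  induction r with
  | zero => intro i h _; interval_cases i; simp
  | succ r ih =>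
    intro i hi h
    rcases Nat.eq_or_lt_of_le hi with rfl | hlt
    · simp
    · have hrD : r ∈ D := h r (by omega) (by omega)
      have := ih i (by omega) (fun y hy1 hy2 => h y hy1 (by omega))
      simp only [vssLrun, if_pos hrD, this]
      omega

lemma vssLrun_spec (D : List Nat) : ∀ r,
    vssLrun D r ≤ r ∧ (∀ m, m < vssLrun D r → (r - 1 - m) ∈ D) ∧
    (vssLrun D r = r ∨ (r - 1 - vssLrun D r) ∉ D) := by
  intro r
  induction r with
  | zero => simp [vssLrun]
  | succ r ih =>
    obtain ⟨h1, h2, h3⟩ := ih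
    by_cases hrD : r ∈ D
    · refine ⟨?_, ?_, ?_⟩
      · simp only [vssLrun, if_pos hrD]; omega
      · intro m hm
        simp only [vssLrun, if_pos hrD] at hm
        rcases Nat.eq_zero_or_pos m with rfl | hm0
        · simpa using hrD
        · have := h2 (m-1) (by omega)
          have he : r + 1 - 1 - m = r - 1 - (m-1) := by omega
          rwa [he]
      · rcases h3 with h | h
        · left; simp [vssLrun, hrD, h]
        · right
          simp only [vssLrun, if_pos hrD]
          have he : r + 1 - 1 - (vssLrun D r + 1) = r - 1 - vssLrun D r := by omega
          rwa [he]
    · refine ⟨by simp [vssLrun, hrD], by simp [vssLrun, hrD], ?_⟩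
      right; simp [vssLrun, hrD]

lemma vssLrun_congr_above (D D' : List Nat) (m : Nat) (hm : m ∉ D) (hm' : m ∉ D') :
    ∀ r, m < r → (∀ y, m < y → y < r → (y ∈ D ↔ y ∈ D')) →
    vssLrun D r = vssLrun D' r := by
  intro r
  induction r with
  | zero => omega
  | succ r ih =>
    intro hr h
    rcases Nat.eq_or_lt_of_le (Nat.succ_le_of_lt hr) with he | hlt
    · have : m = r := by omega
      subst this
      simp [vssLrun, hm, hm']
    · have hr' := h r (by omega) (by omega)
      by_cases hrD : r ∈ D
      · simp [vssLrun, hrD, hr'.1 hrD, ih (by omega) (fun y h1 h2 => h y h1 (by omega))]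
      · have : r ∉ D' := fun hx => hrD (hr'.2 hx)
        simp [vssLrun, hrD, this]

lemma vssFind_spec (D : List Nat) (n : Nat) (hD : ∀ j ∈ D, j < n) :
    ∀ f x fa, vssFaInv n D fa → x ≤ n → vssRoot D (n+1) x - x < f →
      (vssFind f fa x).2 = vssRoot D (n+1) x ∧ vssFaInv n D (vssFind f fa x).1 := by
  intro f
  induction f with
  | zero => intro x fa hinv hx hf; omega
  | succ f ih =>
    intro x fa hinv hx hf
    obtain ⟨hlen, hun, hpr⟩ := hinv
    by_cases hxD : x ∈ D
    · obtain ⟨hlt, hle⟩ := hpr x hx hxD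
      set p := fa.getD x 0 with hp
      have hpn : p ≤ n := le_trans hle (vssRoot_le D n hD (n+1) x (by omega) hx)
      have hrseg : vssRoot D (n+1) p = vssRoot D (n+1) x :=
        vssRoot_segment D n hD (n+1) x p (by omega) (by omega) (by omega) hle
      have hxroot : x < vssRoot D (n+1) x := by
        rcases Nat.eq_or_lt_of_le ((vssRoot_spec D n hD (n+1) x (by omega)).1) with he | h
        · exact absurd hxD (he ▸ (vssRoot_spec D n hD (n+1) x (by omega)).2.1)
        · exact h
      have hfx : vssRoot D (n+1) p - p < f := by rw [hrseg]; omega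
      have hrec := ih p fa ⟨hlen, hun, hpr⟩ hpn hfx
      have hne : ¬ fa.getD x 0 = x := by omega
      have hstep : vssFind (f+1) fa x =
          ((vssFind f fa p).1.set x (vssFind f fa p).2, (vssFind f fa p).2) := by
        simp only [vssFind]
        rw [if_neg hne]
      obtain ⟨hr2, hlen', hun', hpr'⟩ := hrec
      rw [hstep]
      refine ⟨by rw [hr2]; exact hrseg, ?_, ?_, ?_⟩
      · simpa using hlen'
      · intro y hy hyD
        have hyx : y ≠ x := fun he => hyD (he ▸ hxD)
        rw [List.getD_eq_getElem?_getD, List.getElem?_set_ne (Ne.symm hyx),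
            ← List.getD_eq_getElem?_getD]
        exact hun' y hy hyD
      · intro y hy hyD
        by_cases hyx : y = x
        · rw [hyx]
          have hylen : x < (vssFind f fa p).1.length := by rw [hlen']; omega
          rw [List.getD_eq_getElem?_getD, List.getElem?_set_self hylen]
          simp only [Option.getD_some]
          rw [hr2, hrseg]
          exact ⟨hxroot, le_refl _⟩
        · rw [List.getD_eq_getElem?_getD, List.getElem?_set_ne (Ne.symm hyx),
              ← List.getD_eq_getElem?_getD]
          exact hpr' y hy hyD
    · have hpx : fa.getD x 0 = x := hun x hx hxD
      simp only [vssFind, if_pos hpx]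
      exact ⟨(vssRoot_notMem D (n+1) x hxD).symm, hlen, hun, hpr⟩

lemma vssRunR_eq_of (num : Int) : ∀ (l : List Int) (k : Nat), k ≤ l.length →
    (∀ m, m < k → num ≤ l.getD m 0) →
    (k = l.length ∨ ¬ num ≤ l.getD k 0) →
    vssRunR num l = k := by
  intro l
  induction l with
  | nil => intro k h _ _; simp at h; subst h; rfl
  | cons v t ih =>
    intro k hk hall hstop
    rcases Nat.eq_zero_or_pos k with rfl | hk0
    · rcases hstop with h | h
      · simp at h
      · simp only [List.getD_cons_zero] at h
        simp [vssRunR, h]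
    · have hv : num ≤ v := by simpa using hall 0 hk0
      have : vssRunR num t = k - 1 := by
        refine ih (k-1) (by simp at hk; omega) ?_ ?_
        · intro m hm
          have := hall (m+1) (by omega)
          simpa using this
        · rcases hstop with h | h
          · left; simp at h; omega
          · right
            have hk1 : k = (k-1)+1 := by omega
            rw [hk1, List.getD_cons_succ] at h
            exact h
      simp only [vssRunR, if_pos hv, this]
      omega

lemma vssRunL_eq_of (num : Int) : ∀ (l : List Int) (k : Nat), k ≤ l.length →
    (∀ m, m < k → num < l.getD m 0) →
    (k = l.length ∨ ¬ num < l.getD k 0) →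
    vssRunL num l = k := by
  intro l
  induction l with
  | nil => intro k h _ _; simp at h; subst h; rfl
  | cons v t ih =>
    intro k hk hall hstop
    rcases Nat.eq_zero_or_pos k with rfl | hk0
    · rcases hstop with h | h
      · simp at h
      · simp only [List.getD_cons_zero] at h
        simp [vssRunL, h]
    · have hv : num < v := by simpa using hall 0 hk0
      have : vssRunL num t = k - 1 := by
        refine ih (k-1) (by simp at hk; omega) ?_ ?_
        · intro m hm
          have := hall (m+1) (by omega)
          simpa using this
        · rcases hstop with h | h
          · left; simp at h; omega
          · right
            have hk1 : k = (k-1)+1 := by omega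
            rw [hk1, List.getD_cons_succ] at h
            exact h
      simp only [vssRunL, if_pos hv, this]
      omega

lemma vss_getD_drop (l : List Int) (i m : Nat) (h : i + m < l.length) :
    (l.drop i).getD m 0 = l.getD (i+m) 0 := by
  rw [List.getD_eq_getElem _ _ (by simp; omega), List.getD_eq_getElem _ _ h, List.getElem_drop]

lemma vss_getD_take_rev (l : List Int) (i m : Nat) (hi : i ≤ l.length) (hm : m < i) :
    ((l.take i).reverse).getD m 0 = l.getD (i-1-m) 0 := by
  rw [List.getD_eq_getElem _ _ (by simp; omega), List.getD_eq_getElem _ _ (by omega)]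
  rw [List.getElem_reverse, List.getElem_take]
  congr 1
  simp
  omega

lemma vss_mem_zip_range (nums : List Int) (v : Int) (j : Nat) :
    (v, j) ∈ List.zip nums (List.range nums.length) ↔
      j < nums.length ∧ nums.getD j 0 = v := by
  constructor
  · intro h
    obtain ⟨k, hk, hget⟩ := List.mem_iff_getElem.1 h
    have hk' : k < nums.length := by simpa using hk
    rw [List.getElem_zip] at hget
    simp only [List.getElem_range, Prod.mk.injEq] at hget
    obtain ⟨h1, h2⟩ := hget
    subst h2
    exact ⟨hk', by rw [List.getD_eq_getElem _ _ hk']; exact h1⟩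
  · rintro ⟨hj, hv⟩
    refine List.mem_iff_getElem.2 ⟨j, by simpa using hj, ?_⟩
    rw [List.getElem_zip]
    rw [List.getD_eq_getElem _ _ hj] at hv
    simp [hv]

lemma vss_mem_snd {l : List (Int × Nat)} {j : Nat} :
    j ∈ l.map Prod.snd ↔ ∃ v, (v, j) ∈ l := by
  constructor
  · intro h
    obtain ⟨⟨v, j'⟩, h1, h2⟩ := List.mem_map.1 h
    cases h2
    exact ⟨v, h1⟩
  · rintro ⟨v, h⟩
    exact List.mem_map.2 ⟨(v, j), h, rfl⟩

lemma vssLoop_eq (nums : List Int) (threshold : Int) :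
    ∀ (rest done : List (Int × Nat)) (fa sz : List Nat),
      done ++ rest =
        PySem.List.sorted (List.zip nums (List.range nums.length))
          (fun p => (toLex p : Lex (Int × Nat))) true →
      vssInv nums.length (done.map Prod.snd) fa sz →
      vssLoopA threshold fa sz rest = vssLoopB nums threshold rest := by
  intro rest
  induction rest with
  | nil => intro done fa sz _ _; rfl
  | cons hd rest ih =>
    intro done fa sz hq hinv
    obtain ⟨num, i⟩ := hd
    set n := nums.length with hn
    set D := done.map Prod.snd with hDdef
    -- global facts about the sorted list
    have hperm : (done ++ (num,i)::rest).Perm (List.zip nums (List.range n)) := by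
      rw [hq]; exact PySem.List.sorted_perm _ _ _
    have hpw : (done ++ (num,i)::rest).Pairwise
        (fun a b => (toLex b : Lex (Int × Nat)) ≤ (toLex a : Lex (Int × Nat))) := by
      rw [hq]; exact PySem.List.sorted_pairwise_rev _ _
    have hsnd : ((done ++ (num,i)::rest).map Prod.snd).Nodup := by
      have h1 := hperm.map Prod.snd
      rw [List.map_snd_zip (le_of_eq (by simp [hn]))] at h1
      exact h1.nodup_iff.mpr (List.nodup_range)
    have hiD : i ∉ D := by
      rw [List.map_append, List.map_cons] at hsnd
      obtain ⟨_, _, hdisj⟩ := List.nodup_append.1 hsnd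
      intro hmem
      exact hdisj i hmem i (by simp) rfl
    have hmemv : ∀ v j, (v, j) ∈ done ++ (num,i)::rest → j < n ∧ nums.getD j 0 = v := by
      intro v j hj
      exact (vss_mem_zip_range nums v j).1 (hperm.subset hj)
    have hD : ∀ j ∈ D, j < n := by
      intro j hj
      obtain ⟨v, hv⟩ := vss_mem_snd.1 hj
      exact (hmemv v j (List.mem_append_left _ hv)).1
    have hin : i < n ∧ nums.getD i 0 = num :=
      hmemv num i (List.mem_append_right _ (List.mem_cons_self))
    have hpw' := List.pairwise_append.1 hpw
    have hchar : ∀ j, j < n →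
        (j ∈ D ↔ (num < nums.getD j 0 ∨ (nums.getD j 0 = num ∧ i < j))) := by
      intro j hjn
      constructor
      · intro hj
        obtain ⟨v, hv⟩ := vss_mem_snd.1 hj
        have hvj : nums.getD j 0 = v := (hmemv v j (List.mem_append_left _ hv)).2
        have hle := hpw'.2.2 _ hv _ (List.mem_cons_self)
        rw [Prod.Lex.le_iff] at hle
        simp only [ofLex_toLex] at hle
        have hji : j ≠ i := fun he => hiD (he ▸ hj)
        rcases hle with h | ⟨h1, h2⟩
        · left; omega
        · right; exact ⟨by omega, by omega⟩
      · intro hcond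
        have hji : j ≠ i := by
          intro he; subst he
          rcases hcond with h | ⟨h1, h2⟩ <;> omega
        have hz : (nums.getD j 0, j) ∈ done ++ (num,i)::rest :=
          hperm.mem_iff.2 ((vss_mem_zip_range nums _ j).2 ⟨hjn, rfl⟩)
        rcases List.mem_append.1 hz with h | h
        · exact vss_mem_snd.2 ⟨_, h⟩
        · rcases List.mem_cons.1 h with h | h
          · exact absurd (congrArg Prod.snd h) hji
          · have hle := (List.pairwise_cons.1 hpw'.2.1).1 _ h
            rw [Prod.Lex.le_iff] at hle
            simp only [ofLex_toLex] at hle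
            exfalso
            rcases hcond with hc | ⟨hc1, hc2⟩ <;> rcases hle with h' | ⟨h1', h2'⟩ <;> omega
    -- the step of A
    obtain ⟨hfainv, hszlen, hsz⟩ := hinv
    have hfalen : fa.length = n + 1 := hfainv.1
    have hfind := vssFind_spec D n hD fa.length (i+1) fa hfainv (by omega)
      (by
        have := vssRoot_le D n hD (n+1) (i+1) (by omega) (by omega)
        omega)
    rw [hfalen] at hfind
    obtain ⟨hf2, hfainv'⟩ := hfind
    set f := vssRoot D (n+1) (i+1) with hfdef
    obtain ⟨hif, hfD, hivl⟩ := vssRoot_spec D n hD (n+1) (i+1) (by omega)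
    have hfle : f ≤ n := vssRoot_le D n hD (n+1) (i+1) (by omega) (by omega)
    have hszf : sz.getD f 0 = 1 + vssLrun D f := hsz f hfle hfD
    have hszi : sz.getD i 0 = 1 + vssLrun D i := hsz i (by omega) hiD
    have hlrunf : vssLrun D f = f - (i+1) := by
      rw [vssLrun_split D f (i+1) hif (fun y hy1 hy2 => hivl y hy1 hy2)]
      have h0 : vssLrun D (i+1) = 0 := by simp [vssLrun, hiD]
      omega
    -- B's scans compute the same component size
    have hright : vssRunR num (nums.drop (i+1)) = f - (i+1) := by
      refine vssRunR_eq_of num _ _ (by rw [List.length_drop]; omega) ?_ ?_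
      · intro m hm
        rw [vss_getD_drop nums (i+1) m (by omega)]
        have hyD : (i+1+m) ∈ D := hivl _ (by omega) (by omega)
        rcases (hchar _ (by omega)).1 hyD with h | ⟨h1, _⟩ <;> omega
      · by_cases hfn : f = n
        · left; rw [List.length_drop]; omega
        · right
          rw [vss_getD_drop nums (i+1) (f - (i+1)) (by omega)]
          rw [show i+1+(f-(i+1)) = f from by omega]
          intro hle
          apply hfD
          refine (hchar f (by omega)).2 ?_
          rcases lt_or_eq_of_le hle with h | h
          · left; exact h
          · right; exact ⟨h.symm, by omega⟩
    have hleft : vssRunL num ((nums.take i).reverse) = vssLrun D i := by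
      obtain ⟨hk1, hk2, hk3⟩ := vssLrun_spec D i
      refine vssRunL_eq_of num _ _ (by simp; omega) ?_ ?_
      · intro m hm
        rw [vss_getD_take_rev nums i m (by omega) (by omega)]
        have hyD := hk2 m hm
        rcases (hchar _ (by omega)).1 hyD with h | ⟨_, h2⟩
        · exact h
        · omega
      · by_cases hki : vssLrun D i = i
        · left; simp; omega
        · rcases hk3 with h | h
          · exact absurd h hki
          · right
            rw [vss_getD_take_rev nums i (vssLrun D i) (by omega) (by omega)]
            intro hlt
            exact h ((hchar _ (by omega)).2 (Or.inl hlt))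
    -- the two computed sizes agree
    have hsizes : vssLrun D i + 1 + (f - (i+1)) = sz.getD f 0 + sz.getD i 0 - 1 := by
      omega
    have hflen : f < sz.length := by omega
    have hset : (sz.set f (sz.getD f 0 + sz.getD i 0)).getD f 0 = sz.getD f 0 + sz.getD i 0 := by
      rw [List.getD_eq_getElem?_getD, List.getElem?_set_self hflen]
      rfl
    simp only [vssLoopA, vssLoopB, hfalen, hf2, hright, hleft, hset]
    rw [show vssLrun D i + 1 + (f - (i+1)) = sz.getD f 0 + sz.getD i 0 - 1 from hsizes]
    split_ifs with hcond
    · rfl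
    · -- recurse: re-establish the invariant for done ++ [(num,i)]
      set fnd := (vssFind (n+1) fa (i+1)).1 with hfnddef
      obtain ⟨hlen1, hun1, hpr1⟩ := hfainv'
      set D' := (done ++ [(num,i)]).map Prod.snd with hD'def
      have hD'mem : ∀ y, y ∈ D' ↔ (y ∈ D ∨ y = i) := by
        intro y; simp [hD'def, hDdef]
      have hD' : ∀ j ∈ D', j < n := by
        intro j hj
        rcases (hD'mem j).1 hj with h | rfl
        · exact hD j h
        · omega
      have hfD' : f ∉ D' := by
        intro h
        rcases (hD'mem f).1 h with h | h
        · exact hfD h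
        · omega
      have hrootD'i : vssRoot D' (n+1) i = f := by
        refine vssRoot_eq_of D' n hD' (n+1) i f (by omega) (by omega) hfD' ?_
        intro y hy1 hy2
        rcases Nat.eq_or_lt_of_le hy1 with he | h
        · exact (hD'mem y).2 (Or.inr he.symm)
        · exact (hD'mem y).2 (Or.inl (hivl y (by omega) hy2))
      have hsub : ∀ y, y ∈ D → y ∈ D' := fun y h => (hD'mem y).2 (Or.inl h)
      refine ih (done ++ [(num,i)]) (fnd.set i f) (sz.set f (sz.getD f 0 + sz.getD i 0)) ?_ ?_
      · rw [List.append_assoc]; simpa using hq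
      · refine ⟨⟨by simp [hlen1], ?_, ?_⟩, by simp [hszlen], ?_⟩
        · -- unprocessed entries keep fa[x] = x
          intro x hx hxD'
          rw [← hD'def] at hxD'
          have hxi : x ≠ i := fun he => hxD' ((hD'mem x).2 (Or.inr he))
          have hxD : x ∉ D := fun h => hxD' (hsub x h)
          rw [List.getD_eq_getElem?_getD, List.getElem?_set_ne (Ne.symm hxi),
              ← List.getD_eq_getElem?_getD]
          exact hun1 x hx hxD
        · -- processed entries point strictly right, at most to their root
          intro x hx hxD'
          rw [← hD'def] at hxD' ⊢
          by_cases hxi : x = i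
          · subst hxi
            rw [List.getD_eq_getElem?_getD, List.getElem?_set_self (by rw [hlen1]; omega),
                Option.getD_some, hrootD'i]
            omega
          · have hxD : x ∈ D := by
              rcases (hD'mem x).1 hxD' with h | h
              · exact h
              · exact absurd h hxi
            rw [List.getD_eq_getElem?_getD, List.getElem?_set_ne (Ne.symm hxi),
                ← List.getD_eq_getElem?_getD]
            obtain ⟨ha, hb⟩ := hpr1 x hx hxD
            refine ⟨ha, le_trans hb ?_⟩
            obtain ⟨hs1, hs2, _⟩ := vssRoot_spec D' n hD' (n+1) x (by omega)
            exact vssRoot_min D n hD (n+1) x _ (by omega) hs1 (fun h => hs2 (hsub _ h))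
        · -- size entries at unprocessed roots
          intro r hr hrD'
          rw [← hD'def] at hrD' ⊢
          have hri : r ≠ i := fun he => hrD' ((hD'mem r).2 (Or.inr he))
          have hrD : r ∉ D := fun h => hrD' (hsub r h)
          have hlrI : vssLrun D' i = vssLrun D i := by
            refine vssLrun_congr D' D i ?_
            intro y hy
            rw [hD'mem y]
            constructor
            · rintro (h | rfl)
              · exact h
              · omega
            · exact Or.inl
          by_cases hrf : r = f
          · rw [hrf, hset]
            have hsplit : vssLrun D' f = (f - i) + vssLrun D' i := by
              refine vssLrun_split D' f i (by omega) ?_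
              intro y hy1 hy2
              rcases Nat.eq_or_lt_of_le hy1 with he | h
              · exact (hD'mem y).2 (Or.inr he.symm)
              · exact (hD'mem y).2 (Or.inl (hivl y (by omega) hy2))
            rw [hsplit, hlrI]
            omega
          · rw [List.getD_eq_getElem?_getD, List.getElem?_set_ne (Ne.symm hrf),
                ← List.getD_eq_getElem?_getD, hsz r hr hrD]
            by_cases hrlti : r < i
            · have hcg : vssLrun D r = vssLrun D' r := by
                refine vssLrun_congr D D' r ?_
                intro y hy
                rw [hD'mem y]
                constructor
                · exact Or.inl
                · rintro (h | rfl)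
                  · exact h
                  · omega
              omega
            · have hrgt : i + 1 ≤ r := by omega
              have hfler : f ≤ r := vssRoot_min D n hD (n+1) (i+1) r (by omega) hrgt hrD
              have hflt : f < r := by omega
              have hcg : vssLrun D r = vssLrun D' r := by
                refine vssLrun_congr_above D D' f hfD hfD' r hflt ?_
                intro y hy1 hy2
                rw [hD'mem y]
                constructor
                · exact Or.inl
                · rintro (h | rfl)
                  · exact h
                  · omega
              omega
-- ===== VERDICT (by name: the statement is the Claim_ definition above) =====
theorem validSubarraySize_spec : Claim_equal_validSubarraySize := by
  intro nums threshold _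
  unfold Spec_validSubarraySize validSubarraySize validSubarraySize_alt
  refine vssLoop_eq nums threshold _ [] _ _ rfl ?_
  refine ⟨⟨by simp, ?_, by simp⟩, by simp, ?_⟩
  · intro x hx _
    rw [List.getD_eq_getElem _ _ (by simpa using Nat.lt_succ_of_le hx)]
    simp
  · intro r hr _
    have h0 : vssLrun ([] : List Nat) r = 0 := by
      cases r <;> simp [vssLrun]
    rw [List.getD_eq_getElem _ _ (by simpa using Nat.lt_succ_of_le hr)]
    simp [h0]
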